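-- pv_equiv track=rewrite | github.com/mcruse/monotone | broadway/mpx/service/network/async/message/header.py | join_continued_headers
-- ===== SOURCE A (Python) =====
-- def join_continued_headers(headerlines):
--     headers = []
--     for i in range(len(headerlines)):
--         if headerlines[i][0] in ' \t':
--             headers[-1] = headers[-1] + headerlines[i][1:]
--         else:
--             headers.append(headerlines[i])
--     return headers
-- ===== SOURCE B (Python) =====
-- def join_continued_headers(headerlines):
--     # Per-run pass: consecutive folded continuation lines are collected as a
--     # run and appended to the previous header with ONE join, instead of A's
--     # per-line branch that rewrites headers[-1] once per line.
--     headers = []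
--     i = 0
--     n = len(headerlines)
--     while i < n:
--         if headerlines[i][0] in ' \t':
--             parts = []
--             while i < n and headerlines[i][0] in ' \t':
--                 parts.append(headerlines[i][1:])
--                 i += 1
--             headers[-1] += ''.join(parts)
--         else:
--             headers.append(headerlines[i])
--             i += 1
--     return headers
-- ===== Notes on version B (the rewrite author's own statement) =====
-- stated objective: alternative
-- what changed: B partitions the input into runs: each header line collects its entire run of folded continuation lines and joins them in one pass, instead of A's per-line branch that repeatedly rewrites headers[-1].
import Mathlib
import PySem

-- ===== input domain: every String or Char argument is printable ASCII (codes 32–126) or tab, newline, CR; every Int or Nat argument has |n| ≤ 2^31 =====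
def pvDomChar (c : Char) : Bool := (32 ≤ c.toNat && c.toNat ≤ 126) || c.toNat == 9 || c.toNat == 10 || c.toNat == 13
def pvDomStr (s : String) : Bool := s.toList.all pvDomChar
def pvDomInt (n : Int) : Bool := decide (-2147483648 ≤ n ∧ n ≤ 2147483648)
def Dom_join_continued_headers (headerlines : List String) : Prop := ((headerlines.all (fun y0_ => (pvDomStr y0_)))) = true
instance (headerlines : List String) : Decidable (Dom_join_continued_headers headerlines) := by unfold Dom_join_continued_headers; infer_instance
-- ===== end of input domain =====

-- B merges each run of folded continuation lines into its header in one join (per-run pass) instead of A's per-line rewrite of headers[-1]; same return value on all inputs where A returns.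


-- ===== PORT A =====
-- one loop step of A: 'if headerlines[i][0] in ' \t': headers[-1] = headers[-1] + headerlines[i][1:] else: headers.append(headerlines[i])'
-- (the membership of the single char headerlines[i][0] in the 2-char string ' \t' is written as the two char equalities, which is exact;
--  the 'none' branches are where Python raises IndexError — excluded by Pre_)
def joinA_step (headers : List String) (l : String) : List String :=
  match PySem.Str.pyGet? l 0 with
  | some c =>
    if c == ' ' || c == '\t' then
      match PySem.List.pyGet? headers (-1) with
      | some h => headers.dropLast ++ [h ++ PySem.Str.slice l (some 1) none]  -- headers[-1] = headers[-1] + headerlines[i][1:]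
      | none => headers          -- IndexError: headers[-1] on empty list (outside Pre_)
    else headers ++ [l]
  | none => headers ++ [l]       -- IndexError: headerlines[i][0] on an empty line (outside Pre_)

-- 'for i in range(len(headerlines)): … headerlines[i] …'
def join_continued_headers (headerlines : List String) : List String :=
  (PySem.List.pyRange 0 (headerlines.length : Int) 1).foldl
    (fun headers i => joinA_step headers (PySem.List.pyGetD headerlines i "")) []

-- ===== PORT B =====
-- 'headerlines[i][0] in ' \t'' — is this line a folded continuation line?
-- (membership of the single char headerlines[i][0] in the 2-char string ' \t' written as the two
--  char equalities, which is exact; 'none' = empty line, where Python B raises IndexError — outside Pre_)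
def isCont (l : String) : Bool :=
  match PySem.Str.pyGet? l 0 with
  | some c => c == ' ' || c == '\t'
  | none => false

-- l[1:]
def tail1 (l : String) : String := PySem.Str.slice l (some 1) none

-- B's outer while loop over the remaining lines, threading the headers built so far:
-- a continuation line opens a run (itself plus the following continuation lines), whose tails are
-- joined once onto headers[-1]; any other line is appended and the loop moves on by one
def altGo (headers : List String) : List String → List String
  | [] => headers
  | l :: ls =>
    if isCont l then
      match PySem.List.pyGet? headers (-1) with
      | some h =>
          altGo (headers.dropLast ++
                  [h ++ PySem.Str.join "" ((l :: ls.takeWhile isCont).map tail1)])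
                (ls.dropWhile isCont)
      | none => headers      -- IndexError: headers[-1] on the empty list (outside Pre_)
    else altGo (headers ++ [l]) ls
  termination_by hs => hs.length
  decreasing_by
    · simpa using Nat.lt_succ_of_le (List.length_dropWhile_le _ _)
    · simp

def join_continued_headers_alt (headerlines : List String) : List String :=
  altGo [] headerlines

-- ===== PRECONDITION & SPEC =====
-- Pre_ excludes exactly the inputs on which Python A raises IndexError: some line is empty
-- (headerlines[i][0] on ''), or the first line starts with ' '/'\t' (headers[-1] on the empty list).
def Pre_join_continued_headers (headerlines : List String) : Prop :=
  (∀ l ∈ headerlines, l.toList ≠ []) ∧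
  (headerlines = [] ∨
    ((headerlines.headD "").toList.headD 'x' ≠ ' ' ∧ (headerlines.headD "").toList.headD 'x' ≠ '\t'))
instance (headerlines : List String) : Decidable (Pre_join_continued_headers headerlines) := by
  unfold Pre_join_continued_headers; infer_instance

def pvWitness_join_continued_headers : List String := ["A: 1", " one", "\ttwo", "B: 2"]

def Spec_join_continued_headers (headerlines : List String) (out : List String) : Prop := out = join_continued_headers_alt headerlines
instance (headerlines : List String) (out : List String) : Decidable (Spec_join_continued_headers headerlines out) := by unfold Spec_join_continued_headers; infer_instance

-- ===== CLAIM (what is proved, stated in full; the proofs are below) =====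
def Claim_equal_join_continued_headers : Prop := ∀ (headerlines : List String), Dom_join_continued_headers headerlines → Pre_join_continued_headers headerlines → Spec_join_continued_headers headerlines (join_continued_headers headerlines)

-- ===== LEMMAS AND PROOFS =====

-- ''.join(x :: xs) = x + ''.join(xs)
lemma join_empty_cons (x : String) (xs : List String) :
    PySem.Str.join "" (x :: xs) = x ++ PySem.Str.join "" xs := by
  apply String.toList_inj.mp
  simp only [PySem.Str.toList_join, String.toList_append, PySem.Chars.join, List.intercalate,
    List.map_cons]
  cases xs <;> simp

-- a non-continuation line is appended by A's step
lemma joinA_step_not_cont (acc : List String) (l : String) (h : isCont l = false) :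
    joinA_step acc l = acc ++ [l] := by
  unfold joinA_step
  unfold isCont at h
  cases hg : PySem.Str.pyGet? l 0 with
  | none => simp
  | some c => rw [hg] at h; simp only at h; simp [h]

-- a continuation line is glued onto the last header by A's step
lemma joinA_step_cont (acc : List String) (h : String) (c : String) (hc : isCont c = true) :
    joinA_step (acc ++ [h]) c = acc ++ [h ++ tail1 c] := by
  unfold joinA_step
  unfold isCont at hc
  cases hg : PySem.Str.pyGet? c 0 with
  | none => rw [hg] at hc; simp at hc
  | some c0 =>
    rw [hg] at hc
    simp only [hc, if_true, PySem.List.pyGet?_neg_one_append_singleton, List.dropLast_concat]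
    rfl

-- folding A's step over a whole run of continuation lines appends all their tails at once
lemma foldA_cont_run (cs : List String) (pre : List String) (h : String)
    (hcs : ∀ c ∈ cs, isCont c = true) :
    cs.foldl joinA_step (pre ++ [h]) = pre ++ [h ++ PySem.Str.join "" (cs.map tail1)] := by
  induction cs generalizing h with
  | nil => simp [PySem.Str.join]
  | cons c cs ih =>
    rw [List.foldl_cons, joinA_step_cont pre h c (hcs c (by simp)),
        ih (h ++ tail1 c) (fun x hx => hcs x (by simp [hx]))]
    rw [List.map_cons, join_empty_cons, ← String.append_assoc]

-- main invariant: from a non-empty headers state pre ++ [h], A's per-line fold and B's per-run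
-- loop build the same headers
lemma foldA_eq_altGo (hs : List String) (pre : List String) (h : String) :
    hs.foldl joinA_step (pre ++ [h]) = altGo (pre ++ [h]) hs := by
  match hs with
  | [] => rw [altGo, List.foldl_nil]
  | l :: ls =>
    rw [altGo]
    by_cases hl : isCont l = true
    · rw [if_pos hl]
      simp only [PySem.List.pyGet?_neg_one_append_singleton, List.dropLast_concat]
      conv_lhs => rw [← List.takeWhile_append_dropWhile (p := isCont) (l := l :: ls)]
      rw [List.takeWhile_cons_of_pos hl, List.dropWhile_cons_of_pos hl, List.foldl_append,
          foldA_cont_run (l :: ls.takeWhile isCont) pre h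
            (by intro c hc
                rcases List.mem_cons.mp hc with rfl | hc'
                exacts [hl, List.mem_takeWhile_imp hc']),
          foldA_eq_altGo (ls.dropWhile isCont) pre
            (h ++ PySem.Str.join "" ((l :: ls.takeWhile isCont).map tail1))]
    · rw [if_neg hl, List.foldl_cons,
          joinA_step_not_cont (pre ++ [h]) l (Bool.not_eq_true _ ▸ hl)]
      exact foldA_eq_altGo ls (pre ++ [h]) l
  termination_by hs.length
  decreasing_by
    all_goals simp
    all_goals exact List.length_dropWhile_le _ _

-- a line whose first character is neither ' ' nor tab is not a continuation line
lemma isCont_false_of_head (l : String) (c : Char) (cs : List Char) (h : l.toList = c :: cs)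
    (h1 : c ≠ ' ') (h2 : c ≠ '\t') : isCont l = false := by
  unfold isCont
  have hg : PySem.Str.pyGet? l 0 = some c := by simp [h]
  rw [hg]
  simp [h1, h2]

-- ===== VERDICT (by name: the statement is the Claim_ definition above) =====
theorem join_continued_headers_spec : Claim_equal_join_continued_headers := by
  intro hs _hDom hPre
  show join_continued_headers hs = join_continued_headers_alt hs
  unfold join_continued_headers join_continued_headers_alt
  rw [PySem.List.foldl_pyRange_zero_pyGetD' hs "" joinA_step []]
  obtain ⟨hne, hfirst⟩ := hPre
  cases hs with
  | nil => rw [altGo]; rfl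
  | cons l0 rest =>
    have hl0 : isCont l0 = false := by
      rcases hfirst with h | ⟨h1, h2⟩
      · exact absurd h (by simp)
      · obtain ⟨c, cs, hc⟩ := List.exists_cons_of_ne_nil (hne l0 (by simp))
        rw [List.headD_cons, hc, List.headD_cons] at h1 h2
        exact isCont_false_of_head l0 c cs hc h1 h2
    rw [List.foldl_cons, joinA_step_not_cont [] l0 hl0, altGo, if_neg (by simp [hl0])]
    exact foldA_eq_altGo rest [] l0
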